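-- pv_equiv track=rewrite | github.com/abie0416/BiegeAI | backend/services/document_preprocessor.py | _process_line_segments
-- ===== SOURCE A (Python) =====
-- from typing import List, Dict, Optional
--
-- def _process_line_segments(content: str) -> List[Dict]:
--     """Process line-based segments more efficiently"""
--     lines = content.split('\n')
--     segments = []
--     current_segment = []
--
--     for line in lines:
--         line = line.strip()
--         if not line:
--             if current_segment:
--                 segments.append({
--                     'content': '\n'.join(current_segment),
--                     'type': 'line_segment'
--                 })
--                 current_segment = []
--         else:
--             current_segment.append(line)
--
--     # Add the last segment
--     if current_segment:
--         segments.append({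
--             'content': '\n'.join(current_segment),
--             'type': 'line_segment'
--         })
--
--     return segments
-- ===== SOURCE B (Python) =====
-- from typing import List, Dict, Optional
--
-- def _process_line_segments(content: str) -> List[Dict]:
--     """Two-pointer scan over pre-stripped lines: emit each maximal non-blank run."""
--     stripped = [l.strip() for l in content.split('\n')]
--     segments = []
--     i, n = 0, len(stripped)
--     while i < n:
--         if stripped[i]:
--             j = i
--             while j < n and stripped[j]:
--                 j += 1
--             segments.append({'content': '\n'.join(stripped[i:j]), 'type': 'line_segment'})
--             i = j
--         else:
--             i += 1
--     return segments
-- ===== Notes on version B (the rewrite author's own statement) =====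
-- stated objective: alternative
-- what changed: B strips all lines up front and emits each maximal non-blank run with a two-pointer scan (takeWhile/dropWhile), removing A's current_segment accumulator and the duplicated trailing-flush branch.
import Mathlib
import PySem

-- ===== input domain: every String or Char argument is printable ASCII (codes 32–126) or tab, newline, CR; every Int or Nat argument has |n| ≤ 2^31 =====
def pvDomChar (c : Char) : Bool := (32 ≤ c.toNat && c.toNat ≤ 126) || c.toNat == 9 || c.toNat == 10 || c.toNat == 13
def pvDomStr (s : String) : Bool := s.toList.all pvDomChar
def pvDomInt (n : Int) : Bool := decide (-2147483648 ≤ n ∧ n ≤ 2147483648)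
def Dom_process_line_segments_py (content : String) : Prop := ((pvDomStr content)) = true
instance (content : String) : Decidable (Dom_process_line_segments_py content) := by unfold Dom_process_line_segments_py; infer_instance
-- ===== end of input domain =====

-- B re-groups the pre-stripped lines by maximal non-blank runs (two-pointer scan), removing A's accumulator and trailing flush; same return value, similar cost.

-- ===== PORT A =====
def pvSeg (cur : List String) : List (String × String) :=
  [("content", PySem.Str.join "\n" cur), ("type", "line_segment")]

-- the loop body after 'line = line.strip()' (pvStepA strips, then branches as A does)
def pvStepS (st : List (List (String × String)) × List String) (line : String) :
    List (List (String × String)) × List String :=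
  if line = "" then
    if st.2 = [] then st else (st.1 ++ [pvSeg st.2], [])
  else
    (st.1, st.2 ++ [line])

def pvStepA (st : List (List (String × String)) × List String) (line : String) :
    List (List (String × String)) × List String :=
  pvStepS st (PySem.Str.strip line)

def process_line_segments_py (content : String) : List (List (String × String)) :=
  let lines := (PySem.Str.split? content "\n").getD []
  let st := lines.foldl pvStepA ([], [])
  if st.2 = [] then st.1 else st.1 ++ [pvSeg st.2]

-- ===== PORT B =====
-- B's inner while-loops: the run of non-blank lines is takeWhile (· ≠ ""), the scan resumes at dropWhile (· ≠ "")
def pvGo (rest : List String) : List (List (String × String)) :=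
  match rest with
  | [] => []
  | s :: t =>
    if s = "" then pvGo t
    else pvSeg (s :: t.takeWhile (· ≠ "")) :: pvGo (t.dropWhile (· ≠ ""))
termination_by rest.length
decreasing_by
  · simp
  · simpa [Nat.lt_succ_iff] using List.length_dropWhile_le (p := (· ≠ "")) t

def process_line_segments_py_alt (content : String) : List (List (String × String)) :=
  pvGo (((PySem.Str.split? content "\n").getD []).map PySem.Str.strip)

-- ===== PRECONDITION & SPEC =====
def Spec_process_line_segments_py (content : String) (out : List (List (String × String))) : Prop := out = process_line_segments_py_alt content
instance (content : String) (out : List (List (String × String))) : Decidable (Spec_process_line_segments_py content out) := by unfold Spec_process_line_segments_py; infer_instance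

-- ===== CLAIM (what is proved, stated in full; the proofs are below) =====
def Claim_equal_process_line_segments_py : Prop := ∀ (content : String), Dom_process_line_segments_py content → Spec_process_line_segments_py content (process_line_segments_py content)

-- ===== LEMMAS AND PROOFS =====

-- A's trailing flush applied to the fold state
def pvFinish (st : List (List (String × String)) × List String) : List (List (String × String)) :=
  if st.2 = [] then st.1 else st.1 ++ [pvSeg st.2]

lemma pv_main (ls : List String) : ∀ (segs : List (List (String × String))) (cur : List String),
    pvFinish (List.foldl pvStepS (segs, cur) ls) =
      segs ++ (if cur = [] then pvGo ls
               else pvSeg (cur ++ ls.takeWhile (· ≠ "")) :: pvGo (ls.dropWhile (· ≠ ""))) := by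
  induction ls with
  | nil =>
    intro segs cur
    by_cases h : cur = [] <;> simp [pvFinish, pvGo, h]
  | cons x t ih =>
    intro segs cur
    rw [List.foldl_cons]
    by_cases hx : x = ""
    · by_cases hc : cur = []
      · have hstep : pvStepS (segs, cur) x = (segs, cur) := by simp [pvStepS, hx, hc]
        rw [hstep, ih segs cur, hc]
        simp [pvGo, hx]
      · have hstep : pvStepS (segs, cur) x = (segs ++ [pvSeg cur], []) := by
          simp [pvStepS, hx, hc]
        rw [hstep, ih (segs ++ [pvSeg cur]) []]
        simp [pvGo, hx, hc, List.takeWhile, List.dropWhile]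
    · have hstep : pvStepS (segs, cur) x = (segs, cur ++ [x]) := by simp [pvStepS, hx]
      rw [hstep, ih segs (cur ++ [x])]
      by_cases hc : cur = [] <;>
        simp [pvGo, hx, hc, List.takeWhile, List.dropWhile]

-- ===== VERDICT =====
theorem process_line_segments_py_spec : Claim_equal_process_line_segments_py := by
  intro content _
  show process_line_segments_py content = process_line_segments_py_alt content
  unfold process_line_segments_py process_line_segments_py_alt
  have h := pv_main (((PySem.Str.split? content "\n").getD []).map PySem.Str.strip) [] []
  rw [if_pos rfl, List.nil_append, List.foldl_map] at h
  exact h
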